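-- pv_equiv track=rewrite | github.com/phuang1024/python-east | east/langs/md.py | header_size
-- ===== SOURCE A (Python) =====
-- def header_size(line: str):
--     """
--     Assumes the line is already a header.
--     You can check with Header.is_header(line)
--     """
--
--     count = 0
--     for char in line:
--         if char == "#":
--             count += 1
--         elif char != "#" and count > 0:
--             break
--
--     return count
-- ===== SOURCE B (Python) =====
-- def header_size(line: str):
--     """
--     Assumes the line is already a header.
--     You can check with Header.is_header(line)
--     """
--     parts = line.split("#")
--     if len(parts) == 1:
--         return 0
--     n = 1
--     for p in parts[1:-1]:
--         if p == "":
--             n += 1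
--         else:
--             break
--     return n
-- ===== Notes on version B (the rewrite author's own statement) =====
-- stated objective: alternative
-- what changed: Instead of scanning characters with a counter and break, B splits the line on the hash separator and derives the count from the segment structure: 0 if no separator occurred, otherwise 1 plus the number of leading empty interior segments (each empty segment between the first and last piece witnesses one more adjacent separator).
import Mathlib
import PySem

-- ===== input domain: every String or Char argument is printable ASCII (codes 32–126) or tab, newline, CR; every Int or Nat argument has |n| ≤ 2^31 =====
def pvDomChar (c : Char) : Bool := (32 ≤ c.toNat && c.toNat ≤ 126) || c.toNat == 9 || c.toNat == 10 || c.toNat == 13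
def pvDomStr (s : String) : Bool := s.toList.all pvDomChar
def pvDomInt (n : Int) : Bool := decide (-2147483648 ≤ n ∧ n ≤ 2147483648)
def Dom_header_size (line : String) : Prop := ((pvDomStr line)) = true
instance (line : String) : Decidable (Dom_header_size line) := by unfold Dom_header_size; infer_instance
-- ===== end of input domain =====

-- B replaces A's character scan by a split-based computation: split on '#' and read the
-- run length off the segment structure (alternative decomposition, same cost).

-- ===== PORT A =====
-- A's for-loop with `count` and `break`, as structural recursion over the characters.
def headerLoopA : List Char → Int → Int
  | [], count => count
  | c :: rest, count =>
    if c = '#' then headerLoopA rest (count + 1)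
    else if c ≠ '#' ∧ count > 0 then count
    else headerLoopA rest count

def header_size (line : String) : Int := headerLoopA line.toList 0

-- ===== PORT B =====
-- B's `for p in parts[1:-1]: if p == "": n += 1 else: break` loop.
def midLoopB : List (List Char) → Int → Int
  | [], n => n
  | p :: rest, n => if p = [] then midLoopB rest (n + 1) else n

-- B: parts = line.split("#"); 0 if no split happened, else 1 + leading empties of parts[1:-1].
def header_size_alt (line : String) : Int :=
  let parts := PySem.Chars.splitOn line.toList ['#']
  if parts.length = 1 then 0
  else midLoopB (PySem.List.slice parts (some 1) (some (-1))) 1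

-- ===== PRECONDITION & SPEC =====
def Spec_header_size (line : String) (out : Int) : Prop := out = header_size_alt line
instance (line : String) (out : Int) : Decidable (Spec_header_size line out) := by unfold Spec_header_size; infer_instance

-- ===== CLAIM (what is proved, stated in full; the proofs are below) =====
def Claim_equal_header_size : Prop := ∀ (line : String), Dom_header_size line → Spec_header_size line (header_size line)

-- ===== LEMMAS AND PROOFS =====

-- Reference form of split-on-'#' used only in the proofs.
def mySplit : List Char → List Char → List (List Char)
  | [], cur => [cur.reverse]
  | c :: rest, cur => if c = '#' then cur.reverse :: mySplit rest [] else mySplit rest (c :: cur)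

-- run length of the leading '#'-run
def runLen : List Char → Int
  | [] => 0
  | c :: rest => if c = '#' then runLen rest + 1 else 0

theorem splitOn_go_eq (fuel : Nat) : ∀ (l cur : List Char) (acc : List (List Char)),
    l.length ≤ fuel →
    PySem.Chars.splitOn.go ['#'] fuel l cur acc = acc.reverse ++ mySplit l cur := by
  induction fuel with
  | zero =>
    intro l cur acc h
    have : l = [] := List.length_eq_zero_iff.mp (Nat.le_zero.mp h)
    subst this
    simp [PySem.Chars.splitOn.go, mySplit]
  | succ f ih =>
    intro l cur acc h
    cases l with
    | nil => simp [PySem.Chars.splitOn.go, mySplit]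
    | cons c rest =>
      by_cases hc : c = '#'
      · subst hc
        rw [PySem.Chars.splitOn.go]
        simp only [List.isPrefixOf, BEq.rfl, Bool.true_and, if_true, List.length_singleton,
          List.drop_succ_cons, List.drop_zero]
        rw [ih rest [] _ (by simpa using Nat.lt_succ_iff.mp (by simpa using h))]
        simp [mySplit]
      · rw [PySem.Chars.splitOn.go]
        have hpre : (['#'].isPrefixOf (c :: rest)) = false := by
          simp [List.isPrefixOf]; exact fun hEq => (hc hEq.symm).elim
        simp only [hpre, Bool.false_eq_true, if_false]
        rw [ih rest (c :: cur) acc (by simpa using Nat.lt_succ_iff.mp (by simpa using h))]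
        simp [mySplit, hc]

theorem splitOn_eq_mySplit (l : List Char) :
    PySem.Chars.splitOn l ['#'] = mySplit l [] := by
  unfold PySem.Chars.splitOn
  rw [splitOn_go_eq (l.length + 1) l [] [] (by omega)]
  simp

theorem mySplit_ne_nil (l cur : List Char) : mySplit l cur ≠ [] := by
  induction l generalizing cur with
  | nil => simp [mySplit]
  | cons c rest ih =>
    by_cases hc : c = '#' <;> simp [mySplit, hc, ih]

-- tail and length of mySplit do not depend on the accumulated current segment
theorem mySplit_tail_indep (l : List Char) : ∀ cur : List Char,
    (mySplit l cur).drop 1 = (mySplit l []).drop 1 ∧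
    (mySplit l cur).length = (mySplit l []).length := by
  induction l with
  | nil => intro cur; simp [mySplit]
  | cons c rest ih =>
    intro cur
    by_cases hc : c = '#'
    · simp [mySplit, hc]
    · simp only [mySplit, if_neg hc]
      exact ⟨(ih (c :: cur)).1.trans (ih [c]).1.symm,
             (ih (c :: cur)).2.trans (ih [c]).2.symm⟩

theorem mySplit_head_ne (l : List Char) : ∀ cur : List Char, cur ≠ [] →
    ∃ h hs, mySplit l cur = h :: hs ∧ h ≠ [] := by
  induction l with
  | nil =>
    intro cur hcur
    exact ⟨cur.reverse, [], rfl, by simpa using hcur⟩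
  | cons c rest ih =>
    intro cur hcur
    by_cases hc : c = '#'
    · exact ⟨cur.reverse, mySplit rest [], by simp [mySplit, hc], by simpa using hcur⟩
    · simpa [mySplit, hc] using ih (c :: cur) (by simp)

-- midLoopB over the interior segments adds the leading-'#'-run length
theorem midLoopB_mySplit (l : List Char) : ∀ r : Int,
    midLoopB ((mySplit l []).dropLast) r = r + runLen l := by
  induction l with
  | nil => intro r; simp [mySplit, midLoopB, runLen]
  | cons c rest ih =>
    intro r
    by_cases hc : c = '#'
    · have hne := mySplit_ne_nil rest []
      rw [show mySplit (c :: rest) [] = [] :: mySplit rest [] by simp [mySplit, hc]]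
      rw [List.dropLast_cons_of_ne_nil hne]
      simp only [midLoopB, reduceIte]
      rw [ih (r + 1)]
      simp [runLen, hc]; ring
    · obtain ⟨h, hs, heq, hne⟩ := mySplit_head_ne rest [c] (by simp)
      rw [show mySplit (c :: rest) [] = mySplit rest [c] by simp [mySplit, hc], heq]
      cases hs with
      | nil => simp [midLoopB, runLen, hc]
      | cons p ps =>
        rw [List.dropLast_cons_of_ne_nil (by simp)]
        simp [midLoopB, hne, runLen, hc]

-- once A's counter is positive, the loop adds the current '#'-run length
theorem headerLoopA_pos (l : List Char) : ∀ c : Int, 0 < c →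
    headerLoopA l c = c + runLen l := by
  induction l with
  | nil => intro c hc; simp [headerLoopA, runLen]
  | cons a t ih =>
    intro c hc
    by_cases h : a = '#'
    · simp [headerLoopA, runLen, h, ih (c + 1) (by omega)]; ring
    · simp [headerLoopA, runLen, h, hc]

theorem slice_one_negone {α : Type} (x : α) (xs : List α) :
    PySem.List.slice (x :: xs) (some 1) (some (-1)) = xs.dropLast := by
  simp only [PySem.List.slice, PySem.List.clampIdx, List.length_cons]
  norm_num
  rw [List.dropLast_eq_take]
  rw [if_neg (by simp : ¬ ((xs.length : Int) < 0))]

theorem main_eq (l : List Char) :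
    headerLoopA l 0 =
      (if (mySplit l []).length = 1 then 0
       else midLoopB (PySem.List.slice (mySplit l []) (some 1) (some (-1))) 1) := by
  induction l with
  | nil => simp [headerLoopA, mySplit]
  | cons c rest ih =>
    by_cases hc : c = '#'
    · rw [show mySplit (c :: rest) [] = [] :: mySplit rest [] by simp [mySplit, hc]]
      have hlen : ([] :: mySplit rest []).length ≠ 1 := by
        simp [mySplit_ne_nil]
      rw [if_neg hlen, slice_one_negone]
      rw [show headerLoopA (c :: rest) 0 = headerLoopA rest 1 by simp [headerLoopA, hc]]
      rw [headerLoopA_pos rest 1 (by omega), midLoopB_mySplit]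
    · rw [show headerLoopA (c :: rest) 0 = headerLoopA rest 0 by simp [headerLoopA, hc]]
      rw [ih]
      have htail := (mySplit_tail_indep rest [c]).1
      rw [show mySplit (c :: rest) [] = mySplit rest [c] by simp [mySplit, hc]]
      obtain ⟨h0, hs0, heq0⟩ := List.exists_cons_of_ne_nil (mySplit_ne_nil rest [])
      obtain ⟨h1, hs1, heq1⟩ := List.exists_cons_of_ne_nil (mySplit_ne_nil rest [c])
      have hseq : hs0 = hs1 := by
        have h2 := htail; rw [heq0, heq1] at h2; simpa using h2.symm
      subst hseq
      rw [heq0, heq1, slice_one_negone, slice_one_negone]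
      simp

-- ===== VERDICT (by name: the statement is the Claim_ definition above) =====
theorem header_size_spec : Claim_equal_header_size := by
  intro line _
  unfold Spec_header_size header_size header_size_alt
  rw [splitOn_eq_mySplit, main_eq]
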